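-- pv_equiv track=rewrite | github.com/epistemicjanitor/jobanalysis | utilities/keyword_counter/counter.py | cCounterHelper
-- ===== SOURCE A (Python) =====
-- def cCounterHelper(test_list):
--     key1 = 'programming coding software engineering scripting development developing engineer language languages java julia python scala fortran bash ruby sql perl r matlab data analytics praktijkervaring statistische analyse statistique programmation mining clustering classification sap hana manipulating visualizing building statistical programmier stata programmeren analyse mysql php gnuplot visualisatie technologien techniques vba postgresql druid presto hive cassandra keras tensorflow'
--     key2 = 'experience exposure demonstrable essential knowledge skill skills proficiency skilled requirements requirement practical proven professional passion strong'
--     kws1 = key1.split()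
--     kws2 = key2.split()
--     kw1cnt = 0
--     kw2cnt = 0
--
--     for keyword in kws1:
--         for _, token in enumerate(test_list):
--             if token == keyword:
--                 kw1cnt += 1
--                 break
--     for keyword in kws2:
--         for _, token in enumerate(test_list):
--             if token == keyword:
--                 kw2cnt += 1
--                 break
--     return kw1cnt, kw2cnt
-- ===== SOURCE B (Python) =====
-- def cCounterHelper(test_list):
--     key1 = 'programming coding software engineering scripting development developing engineer language languages java julia python scala fortran bash ruby sql perl r matlab data analytics praktijkervaring statistische analyse statistique programmation mining clustering classification sap hana manipulating visualizing building statistical programmier stata programmeren analyse mysql php gnuplot visualisatie technologien techniques vba postgresql druid presto hive cassandra keras tensorflow'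
--     key2 = 'experience exposure demonstrable essential knowledge skill skills proficiency skilled requirements requirement practical proven professional passion strong'
--     c1 = {}
--     for w in key1.split():
--         c1[w] = c1.get(w, 0) + 1
--     c2 = {}
--     for w in key2.split():
--         c2[w] = c2.get(w, 0) + 1
--     seen = set(test_list)
--     kw1cnt = 0
--     kw2cnt = 0
--     for t in seen:
--         kw1cnt += c1.get(t, 0)
--         kw2cnt += c2.get(t, 0)
--     return kw1cnt, kw2cnt
-- ===== Notes on version B (the rewrite author's own statement) =====
-- stated objective: faster
-- what changed: B builds multiplicity tables for the two keyword strings once and a set of the input tokens, then makes a single pass over the distinct tokens summing each token's keyword multiplicity, instead of A's per-keyword rescans of the whole input list.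
import Mathlib
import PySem

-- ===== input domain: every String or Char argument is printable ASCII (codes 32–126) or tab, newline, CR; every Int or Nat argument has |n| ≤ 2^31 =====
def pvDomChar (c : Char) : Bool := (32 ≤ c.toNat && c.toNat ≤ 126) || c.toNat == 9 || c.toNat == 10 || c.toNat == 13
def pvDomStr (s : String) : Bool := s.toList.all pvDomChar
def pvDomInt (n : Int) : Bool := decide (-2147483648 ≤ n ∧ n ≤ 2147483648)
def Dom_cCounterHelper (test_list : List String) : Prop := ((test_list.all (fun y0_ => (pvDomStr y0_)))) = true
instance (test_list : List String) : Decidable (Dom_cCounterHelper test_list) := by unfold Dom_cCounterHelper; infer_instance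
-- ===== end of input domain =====

-- B replaces A's per-keyword rescans of the input by counter tables over the keyword
-- strings plus one pass over the distinct input tokens (objective: faster).

-- ===== PORT A =====
def pvKey1 : String := "programming coding software engineering scripting development developing engineer language languages java julia python scala fortran bash ruby sql perl r matlab data analytics praktijkervaring statistische analyse statistique programmation mining clustering classification sap hana manipulating visualizing building statistical programmier stata programmeren analyse mysql php gnuplot visualisatie technologien techniques vba postgresql druid presto hive cassandra keras tensorflow"
def pvKey2 : String := "experience exposure demonstrable essential knowledge skill skills proficiency skilled requirements requirement practical proven professional passion strong"

-- inner 'for _, token in enumerate(test_list): if token == keyword: cnt += 1; break'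
-- (the scan's contribution to the counter: 1 on the first match, else 0)
def pvScanFirst (test_list : List String) (keyword : String) : Int :=
  match test_list with
  | [] => 0
  | token :: rest => if token == keyword then 1 else pvScanFirst rest keyword

def cCounterHelper (test_list : List String) : Int × Int :=
  let kws1 := PySem.Str.split₀ pvKey1
  let kws2 := PySem.Str.split₀ pvKey2
  let kw1cnt := kws1.foldl (fun acc keyword => acc + pvScanFirst test_list keyword) 0
  let kw2cnt := kws2.foldl (fun acc keyword => acc + pvScanFirst test_list keyword) 0
  (kw1cnt, kw2cnt)

-- ===== PORT B =====
def cCounterHelper_alt (test_list : List String) : Int × Int :=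
  let c1 : PySem.Dict String Int :=
    (PySem.Str.split₀ pvKey1).foldl (fun d w => d.insert w (d.getD w 0 + 1)) PySem.Dict.empty
  let c2 : PySem.Dict String Int :=
    (PySem.Str.split₀ pvKey2).foldl (fun d w => d.insert w (d.getD w 0 + 1)) PySem.Dict.empty
  let seen : PySem.Set String := PySem.Set.ofList test_list
  seen.foldl (fun acc t => (acc.1 + c1.getD t 0, acc.2 + c2.getD t 0)) (0, 0)

-- ===== PRECONDITION & SPEC =====
def Spec_cCounterHelper (test_list : List String) (out : Int × Int) : Prop := out = cCounterHelper_alt test_list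
instance (test_list : List String) (out : Int × Int) : Decidable (Spec_cCounterHelper test_list out) := by unfold Spec_cCounterHelper; infer_instance

-- ===== CLAIM (what is proved, stated in full; the proofs are below) =====
def Claim_equal_cCounterHelper : Prop := ∀ (test_list : List String), Dom_cCounterHelper test_list → Spec_cCounterHelper test_list (cCounterHelper test_list)

-- ===== LEMMAS AND PROOFS =====

theorem pvScanFirst_eq (S : List String) (k : String) :
    pvScanFirst S k = if k ∈ S then 1 else 0 := by
  induction S with
  | nil => simp [pvScanFirst]
  | cons t rest ih =>
    simp only [pvScanFirst, ih, List.mem_cons]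
    by_cases h : t = k
    · simp [h]
    · simp [h, Ne.symm h]

theorem pv_indicator_sum (k : String) (L : List String) (hnd : L.Nodup) :
    (L.map (fun t => if k = t then (1 : Int) else 0)).sum = if k ∈ L then 1 else 0 := by
  induction L with
  | nil => simp
  | cons t rest ih =>
    rcases List.nodup_cons.mp hnd with ⟨htr, hrest⟩
    by_cases h : k = t
    · subst h
      simp [List.map_cons, ih hrest, htr]
    · simp [List.map_cons, ih hrest, h]

theorem pv_count_sum (keys S : List String) :
    keys.foldl (fun acc kw => acc + pvScanFirst S kw) 0
      = (PySem.Set.ofList S).foldl (fun acc t => acc + (keys.count t : Int)) 0 := by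
  rw [PySem.List.foldl_add, PySem.List.foldl_add]
  simp only [zero_add]
  induction keys with
  | nil => simp
  | cons k keys ih =>
    have hcount : ∀ t : String, ((k :: keys).count t : Int)
        = (keys.count t : Int) + (if k = t then 1 else 0) := by
      intro t
      by_cases h : k = t <;> simp [h]
    calc ((k :: keys).map (fun kw => pvScanFirst S kw)).sum
        = pvScanFirst S k + (keys.map (fun kw => pvScanFirst S kw)).sum := by
          simp [List.map_cons]
      _ = (if k ∈ S then 1 else 0)
            + ((PySem.Set.ofList S).map (fun t => (keys.count t : Int))).sum := by
          rw [pvScanFirst_eq, ih]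
      _ = ((PySem.Set.ofList S).map (fun t => ((k :: keys).count t : Int))).sum := by
          have hsplit : ((PySem.Set.ofList S).map (fun t => ((k :: keys).count t : Int))).sum
              = ((PySem.Set.ofList S).map (fun t => (keys.count t : Int))).sum
                + ((PySem.Set.ofList S).map (fun t => if k = t then (1 : Int) else 0)).sum := by
            rw [← List.sum_map_add]
            refine congrArg List.sum (List.map_congr_left ?_)
            intro t _
            rw [hcount t]
          rw [hsplit, pv_indicator_sum k _ (PySem.Set.nodup_ofList S)]
          simp only [PySem.Set.mem_ofList]
          ring

-- ===== VERDICT (by name: the statement is the Claim_ definition above) =====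
theorem cCounterHelper_spec : Claim_equal_cCounterHelper := by
  intro test_list _
  show cCounterHelper test_list = cCounterHelper_alt test_list
  simp only [cCounterHelper, cCounterHelper_alt]
  simp only [PySem.Dict.foldl_insert_getD_add_one_eq_counter, PySem.Dict.getD_counter]
  rw [PySem.List.foldl_prod_mk
    (f := fun (acc : Int) t => acc + ((PySem.Str.split₀ pvKey1).count t : Int))
    (g := fun (acc : Int) t => acc + ((PySem.Str.split₀ pvKey2).count t : Int))]
  rw [pv_count_sum, pv_count_sum]
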